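-- pv_equiv track=rewrite | github.com/blxz96/DD2418-Language-Engineering | Assignment 3/word2vec/w2v.py | clean_line
-- ===== SOURCE A (Python) =====
-- import string
--
-- def clean_line(line):
--     """
--     The function takes a line from the text file as a string,
--     removes all the punctuation and digits from it and returns
--     all words in the cleaned line as a list
--
--     :param      line:  The line
--     :type       line:  str
--     """
--     cleaned_string = ''
--     cleaned_line = []
--     for element in line:
--         if element not in string.punctuation and element not in string.digits:
--             cleaned_string += element
--     cleaned_line = cleaned_string.split()
--     return cleaned_line
-- ===== SOURCE B (Python) =====
-- import string
--
-- _STRIP = set(string.punctuation + string.digits)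
--
--
-- def clean_line(line):
--     # Split into whitespace tokens first, then clean each token;
--     # char removal never touches whitespace, so the tokens coincide.
--     result = []
--     for word in line.split():
--         cleaned = ''.join(ch for ch in word if ch not in _STRIP)
--         if cleaned:
--             result.append(cleaned)
--     return result
-- ===== Notes on version B (the rewrite author's own statement) =====
-- stated objective: alternative
-- what changed: B splits the line into whitespace tokens first and filters punctuation/digits per token (set membership, join once per token), appending only non-empty cleaned tokens, instead of A's char-by-char string concatenation over the whole line followed by split.
import Mathlib
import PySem

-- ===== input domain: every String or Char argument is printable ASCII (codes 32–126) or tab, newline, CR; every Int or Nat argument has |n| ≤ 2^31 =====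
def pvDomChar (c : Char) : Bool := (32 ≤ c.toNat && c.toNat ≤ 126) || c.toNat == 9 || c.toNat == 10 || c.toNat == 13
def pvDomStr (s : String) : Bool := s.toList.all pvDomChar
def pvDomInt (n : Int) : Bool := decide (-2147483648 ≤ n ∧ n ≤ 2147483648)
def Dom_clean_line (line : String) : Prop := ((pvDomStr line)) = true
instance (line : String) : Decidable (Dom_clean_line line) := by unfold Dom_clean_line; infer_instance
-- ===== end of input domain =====

-- B splits the line into whitespace tokens first and filters punctuation/digits per token
-- (alternative decomposition), instead of A's clean-the-whole-line-then-split.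

-- string.punctuation and string.digits as character lists
def pyPunct : List Char := "!\"#$%&'()*+,-./:;<=>?@[\\]^_`{|}~".toList
def pyDigits : List Char := "0123456789".toList

-- ===== PORT A =====
def clean_line (line : String) : List String :=
  let cleaned_string : String :=
    line.toList.foldl
      (fun acc c => if c ∉ pyPunct ∧ c ∉ pyDigits then acc.push c else acc) ""
  PySem.Str.split₀ cleaned_string

-- ===== PORT B =====
-- the precomputed set string.punctuation + string.digits
def pvStrip : List Char := pyPunct ++ pyDigits

def clean_line_alt (line : String) : List String :=
  (PySem.Str.split₀ line).foldl
    (fun res w =>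
      let cleaned := String.ofList (w.toList.filter (fun c => c ∉ pvStrip))
      if cleaned.toList.isEmpty then res else res ++ [cleaned])
    []

-- ===== PRECONDITION & SPEC =====
def Spec_clean_line (line : String) (out : List String) : Prop := out = clean_line_alt line
instance (line : String) (out : List String) : Decidable (Spec_clean_line line out) := by unfold Spec_clean_line; infer_instance

-- ===== CLAIM (what is proved, stated in full; the proofs are below) =====
def Claim_equal_clean_line : Prop := ∀ (line : String), Dom_clean_line line → Spec_clean_line line (clean_line line)

-- ===== LEMMAS AND PROOFS =====

-- the "keep this character" predicate both ports decide
def pvKeep (c : Char) : Bool := decide (c ∉ pvStrip)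

lemma pvKeep_eq : pvKeep = fun c => !decide (c ∈ pvStrip) := by
  funext c; simp [pvKeep, decide_not]

-- on the domain, whitespace characters are never stripped
lemma keep_of_space (c : Char) (hd : pvDomChar c = true) (hs : PySem.Chars.isspace c = true) :
    pvKeep c = true := by
  have hall : pvStrip.all (fun d => !(d.toNat == 9 || d.toNat == 10 || d.toNat == 13 || d.toNat == 32)) = true := by decide
  simp [pvDomChar] at hd
  simp [PySem.Chars.isspace] at hs
  have hn : c.toNat = 9 ∨ c.toNat = 10 ∨ c.toNat = 13 ∨ c.toNat = 32 := by omega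
  simp [pvKeep]
  intro hm
  have := List.all_eq_true.mp hall c hm
  simp at this
  omega

-- cleaning a token list: filter each token, drop the tokens that became empty
def pvClean (l : List (List Char)) : List (List Char) :=
  (l.map (List.filter pvKeep)).filter (fun t => !t.isEmpty)

-- A's character loop builds exactly the filtered character list
lemma foldA_toList (cs : List Char) (acc : String) :
    (cs.foldl (fun acc c => if c ∉ pyPunct ∧ c ∉ pyDigits then acc.push c else acc) acc).toList
      = acc.toList ++ cs.filter pvKeep := by
  induction cs generalizing acc with
  | nil => simp
  | cons c rest ih =>
    by_cases h : c ∉ pyPunct ∧ c ∉ pyDigits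
    · have hk : pvKeep c = true := by simp [pvKeep, pvStrip]; tauto
      simp [List.foldl, h, ih, hk, List.filter]
    · have hk : pvKeep c = false := by
        simp [pvKeep, pvStrip]
        simp only [not_and_or, not_not] at h
        tauto
      simp [List.foldl, h, ih, hk, List.filter]

-- filtering strip-characters out commutes with whitespace splitting (go-level invariant)
lemma go_filter (cs : List Char) : ∀ (cur : List Char) (acc : List (List Char)),
    (∀ c ∈ cs, PySem.Chars.isspace c = true → pvKeep c = true) →
    PySem.Chars.split₀.go (cs.filter pvKeep) (cur.filter pvKeep) (pvClean acc)
      = pvClean (PySem.Chars.split₀.go cs cur acc) := by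
  induction cs with
  | nil =>
    intro cur acc _
    by_cases hc : cur.filter pvKeep = []
    · by_cases hc0 : cur = [] <;>
        simp [PySem.Chars.split₀.go, hc, hc0, pvClean, List.isEmpty_iff, List.filter_reverse]
    · have hc0 : cur ≠ [] := by rintro rfl; simp at hc
      simp [PySem.Chars.split₀.go, hc, hc0, pvClean, List.isEmpty_iff, List.filter_reverse]
  | cons c rest ih =>
    intro cur acc H
    have Hr : ∀ c ∈ rest, PySem.Chars.isspace c = true → pvKeep c = true := by
      intro d hd; exact H d (List.mem_cons_of_mem _ hd)
    by_cases hsp : PySem.Chars.isspace c = true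
    · have hk : pvKeep c = true := H c List.mem_cons_self hsp
      by_cases hc : cur.filter pvKeep = []
      · by_cases hc0 : cur = []
        · simpa [PySem.Chars.split₀.go, hk, hsp, hc, hc0] using ih [] acc Hr
        · have : pvClean (cur.reverse :: acc) = pvClean acc := by
            simp [pvClean, List.filter_reverse, hc]
          simpa [PySem.Chars.split₀.go, hk, hsp, hc, hc0, this] using ih [] (cur.reverse :: acc) Hr
      · have hc0 : cur ≠ [] := by rintro rfl; simp at hc
        have : pvClean (cur.reverse :: acc) = (cur.filter pvKeep).reverse :: pvClean acc := by
          simp [pvClean, List.filter_reverse, hc]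
        simpa [PySem.Chars.split₀.go, hk, hsp, hc, hc0, this] using ih [] (cur.reverse :: acc) Hr
    · by_cases hk : pvKeep c = true
      · simpa [PySem.Chars.split₀.go, hk, hsp, List.filter] using ih (c :: cur) acc Hr
      · have hk' : pvKeep c = false := by simpa using hk
        simpa [PySem.Chars.split₀.go, hk', hsp, List.filter] using ih (c :: cur) acc Hr

lemma split₀_filter (cs : List Char)
    (H : ∀ c ∈ cs, PySem.Chars.isspace c = true → pvKeep c = true) :
    PySem.Chars.split₀ (cs.filter pvKeep) = pvClean (PySem.Chars.split₀ cs) := by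
  simpa [PySem.Chars.split₀, pvClean] using go_filter cs [] [] H

-- B's token loop is exactly "clean the token list" (map/filter form)
lemma foldB (L : List (List Char)) :
    (L.map String.ofList).foldl (fun res w =>
       let cleaned := String.ofList (w.toList.filter (fun c => c ∉ pvStrip))
       if cleaned.toList.isEmpty then res else res ++ [cleaned]) []
    = (pvClean L).map String.ofList := by
  rw [List.foldl_map]
  have hcongr : L.foldl (fun res t =>
       let cleaned := String.ofList ((String.ofList t).toList.filter (fun c => c ∉ pvStrip))
       if cleaned.toList.isEmpty then res else res ++ [cleaned]) []
      = L.foldl (fun res t => if !(t.filter pvKeep).isEmpty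
          then res ++ [String.ofList (t.filter pvKeep)] else res) [] := by
    apply PySem.List.foldl_congr_mem
    intro acc t _
    dsimp only
    split <;> simp_all [pvKeep_eq]
  rw [hcongr, PySem.List.foldl_append_if]
  simp [pvClean, List.filter_map, Function.comp_def]

-- ===== VERDICT (by name: the statement is the Claim_ definition above) =====
theorem clean_line_spec : Claim_equal_clean_line := by
  intro line hdom
  unfold Spec_clean_line clean_line clean_line_alt
  have H : ∀ c ∈ line.toList, PySem.Chars.isspace c = true → pvKeep c = true := by
    intro c hc hs
    exact keep_of_space c (List.all_eq_true.mp hdom c hc) hs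
  have hA : (line.toList.foldl
      (fun acc c => if c ∉ pyPunct ∧ c ∉ pyDigits then acc.push c else acc) "").toList
      = line.toList.filter pvKeep := by simpa using foldA_toList line.toList ""
  simp only [PySem.Str.split₀, hA, split₀_filter _ H, foldB]
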